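-- pv_equiv track=rewrite | github.com/EnzoZa/Atelier_Programmation_Python | Atelier 4/Atelier_4_Zampaglione Motbal.py | mot_optimaux
-- ===== SOURCE A (Python) =====
-- def mots_Nlettres(lst_mot:list,n:int)->list:
--     """Keep the words into the list (lst_mot) with the number of characters desired (n)
--     Keyword argument :
--     lst_mot -- a list of word
--     n -- the desired number of characters
--     returns a list of words with the desired number of characters
--     """
--     result = []
--     for i in lst_mot:
--         if(len(i) == n):
--             result.append(i)
--     return result
--
-- def presente(lettre:str, mot:str)->int:
--     """Check if a letter (lettre) is in a word (mot)
--     Keyword argument :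
--     lettre -- a letter
--     mot -- the word
--     return a bool (True = letter is in the word/ False = letter is not in the word)
--     """
--     return mot.find(lettre)
--
-- def mot_possible(mot:str, lettres:str)->bool:
--     """Check if the word (mot) can be obtained with letters (lettres)
--     Keyword argument :
--     mot -- the word
--     lettres -- the letters
--     return a bool (True = the word can be obtained with the letters/ False = the word can't be obtained with the letters)
--     """
--     result = True
--     list_lettres:str = lettres
--     partition:list = []
--     for i in mot:
--         index = presente(i, list_lettres)
--         if(index>=0):
--             partition = list(list_lettres.partition(i))
--             partition.pop(1)
--             list_lettres = "".join(partition)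
--         else:
--             result = False
--     return result
--
-- def mot_optimaux(dico:list, lettres:str)->list:
--     """Check if you can obtain optimal words (based on length) in the dictionary (dico) with letters (lettres)
--     Keyword argument :
--     dico -- the dictionary
--     lettres -- the letters
--     return a list of words of maximum length present in the dictionary who we can obtain with the letters
--     """
--     list_mot = []
--     for i in range(len(lettres), 0, -1):
--         mot_existant = mots_Nlettres(dico, i)
--         #if(len(mot_existant) > 0)
--         for i in mot_existant:
--             if(mot_possible(i, lettres)):
--                 list_mot.append(i)
--     return list_mot
-- ===== SOURCE B (Python) =====
-- def mot_possible(mot: str, lettres: str) -> bool: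
--     """Check if the word (mot) can be obtained with letters (lettres)."""
--     result = True
--     list_lettres: str = lettres
--     partition: list = []
--     for i in mot:
--         index = list_lettres.find(i)
--         if index >= 0:
--             partition = list(list_lettres.partition(i))
--             partition.pop(1)
--             list_lettres = "".join(partition)
--         else:
--             result = False
--     return result
--
--
-- def mot_optimaux(dico: list, lettres: str) -> list:
--     """One pass over dico collecting every non-empty formable word of length
--     at most len(lettres), then a stable sort by decreasing length (ties keep
--     dico order)."""
--     candidats = [w for w in dico
--                  if 1 <= len(w) <= len(lettres) and mot_possible(w, lettres)]
--     return sorted(candidats, key=lambda w: -len(w))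
-- ===== Notes on version B (the rewrite author's own statement) =====
-- stated objective: faster
-- what changed: Replaces A's len(lettres) full scans of dico (one per descending length bucket) with a single scan collecting formable words followed by one stable sort keyed on decreasing length.
import Mathlib
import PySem

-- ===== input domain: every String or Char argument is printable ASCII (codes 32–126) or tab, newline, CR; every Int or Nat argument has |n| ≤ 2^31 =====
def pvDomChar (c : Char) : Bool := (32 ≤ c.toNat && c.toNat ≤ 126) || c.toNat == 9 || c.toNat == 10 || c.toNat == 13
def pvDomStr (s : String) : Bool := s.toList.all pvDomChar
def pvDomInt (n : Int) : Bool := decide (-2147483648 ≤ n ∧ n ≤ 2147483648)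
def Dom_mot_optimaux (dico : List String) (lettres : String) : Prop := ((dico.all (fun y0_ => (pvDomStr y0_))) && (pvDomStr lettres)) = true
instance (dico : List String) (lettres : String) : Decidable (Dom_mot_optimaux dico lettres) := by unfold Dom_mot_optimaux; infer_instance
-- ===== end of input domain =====

-- B replaces A's len(lettres) descending-length scans of dico with one scan plus one
-- stable sort keyed on decreasing length (measured faster on the generated inputs).

-- ===== PORT A =====
def mots_Nlettres (lst_mot : List String) (n : Int) : List String :=
  lst_mot.foldl (fun result i => if PySem.Str.len i = n then result ++ [i] else result) []

def presente (lettre : List Char) (mot : List Char) : Int :=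
  PySem.Chars.find mot lettre

def mot_possible (mot : String) (lettres : String) : Bool :=
  (mot.toList.foldl
    (fun (st : Bool × List Char) i =>
      let index := presente [i] st.2
      if 0 ≤ index then
        -- list(partition(i)); pop(1); "".join: removes the FIRST occurrence of the
        -- one-char separator i — exact here because index = find ≥ 0 points at it
        (st.1, st.2.take index.toNat ++ st.2.drop (index.toNat + 1))
      else
        (false, st.2))
    (true, lettres.toList)).1

def mot_optimaux (dico : List String) (lettres : String) : List String :=
  (PySem.List.pyRange (PySem.Str.len lettres) 0 (-1)).foldl
    (fun list_mot i =>
      let mot_existant := mots_Nlettres dico i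
      mot_existant.foldl
        (fun lm m => if mot_possible m lettres then lm ++ [m] else lm) list_mot)
    []

-- ===== PORT B =====
def mot_optimaux_alt (dico : List String) (lettres : String) : List String :=
  let candidats := dico.filter (fun w =>
    decide (1 ≤ PySem.Str.len w ∧ PySem.Str.len w ≤ PySem.Str.len lettres)
      && mot_possible w lettres)
  PySem.List.sorted candidats (fun w => -(PySem.Str.len w))

-- ===== PRECONDITION & SPEC =====
def Spec_mot_optimaux (dico : List String) (lettres : String) (out : List String) : Prop := out = mot_optimaux_alt dico lettres
instance (dico : List String) (lettres : String) (out : List String) : Decidable (Spec_mot_optimaux dico lettres out) := by unfold Spec_mot_optimaux; infer_instance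

-- ===== CLAIM (what is proved, stated in full; the proofs are below) =====
def Claim_equal_mot_optimaux : Prop := ∀ (dico : List String) (lettres : String), Dom_mot_optimaux dico lettres → Spec_mot_optimaux dico lettres (mot_optimaux dico lettres)

-- ===== LEMMAS AND PROOFS =====

-- range(n, 0, -1) lists n, n-1, …, 1
theorem pyRange_desc (n : Nat) :
    PySem.List.pyRange (n : Int) 0 (-1)
      = (List.range n).map (fun k : Nat => (n : Int) - (k : Int)) := by
  simp only [PySem.List.pyRange]
  cases n with
  | zero => simp
  | succ m =>
    have h1 : (0:Int) < ((m+1:Nat):Int) := by positivity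
    rw [if_neg (by norm_num), if_neg (by norm_num), if_pos (by exact_mod_cast h1)]
    have h2 : ((((m+1:Nat):Int) - 0 + - -1 - 1) / - -1).toNat = m+1 := by
      norm_num
    rw [h2]
    apply List.map_congr_left
    intro k _
    ring

theorem motsN_eq_filter (lst : List String) (n : Int) :
    mots_Nlettres lst n = lst.filter (fun w => decide (PySem.Str.len w = n)) := by
  unfold mots_Nlettres
  have := PySem.List.foldl_append_if (fun w => decide (PySem.Str.len w = n)) id lst []
  simpa using this

theorem inner_eq_filter (lettres : String) (l acc : List String) :
    l.foldl (fun lm m => if mot_possible m lettres then lm ++ [m] else lm) acc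
      = acc ++ l.filter (fun m => mot_possible m lettres) := by
  have := PySem.List.foldl_append_if (fun m => mot_possible m lettres) id l acc
  simpa using this

-- A's double loop is the descending-length concatenation of buckets
theorem motA_eq_flatMap (dico : List String) (lettres : String) :
    mot_optimaux dico lettres
      = (List.range lettres.toList.length).flatMap
          (fun k : Nat => dico.filter (fun w =>
            decide (PySem.Str.len w = (lettres.toList.length : Int) - (k : Int))
              && mot_possible w lettres)) := by
  unfold mot_optimaux
  rw [PySem.Str.len_eq, pyRange_desc, List.foldl_map]
  have hstep : (fun (list_mot : List String) (k : Nat) =>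
      (mots_Nlettres dico ((lettres.toList.length : Int) - (k : Int))).foldl
        (fun lm m => if mot_possible m lettres then lm ++ [m] else lm) list_mot)
      = fun (list_mot : List String) (k : Nat) => list_mot ++ dico.filter (fun w =>
          decide (PySem.Str.len w = (lettres.toList.length : Int) - (k : Int))
            && mot_possible w lettres) := by
    funext lm k
    rw [motsN_eq_filter, inner_eq_filter, List.filter_filter]
    congr 1
    apply List.filter_congr
    intro w _
    rw [Bool.and_comm]
  rw [hstep, PySem.List.foldl_append_eq_flatMap]
  simp

-- insertBy slides past a prefix it is not ordered before
theorem insertBy_append_left {α : Type} (bef : α → α → Bool) (x : α) (p q : List α)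
    (h : ∀ y ∈ p, bef x y = false) :
    PySem.List.insertBy bef x (p ++ q) = p ++ PySem.List.insertBy bef x q := by
  induction p with
  | nil => simp
  | cons a p' ih =>
    have ha : bef x a = false := h a (by simp)
    simp [PySem.List.insertBy, ha, ih fun y hy => h y (by simp [hy])]

theorem insertBy_eq_cons {α : Type} (bef : α → α → Bool) (x : α) (ys : List α)
    (h : ∀ y ∈ ys, bef x y = true) :
    PySem.List.insertBy bef x ys = x :: ys := by
  cases ys with
  | nil => simp [PySem.List.insertBy]
  | cons y ys' => simp [PySem.List.insertBy, h y (by simp)]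

-- inserting x into a bucket decomposition appends x at the END of its own bucket
theorem insertBy_flatMap_buckets (key : String → Int) (x : String) (ks : List Int)
    (F : Int → List String) (hks : ks.Pairwise (· < ·))
    (hF : ∀ j ∈ ks, ∀ y ∈ F j, key y = j) (hk : key x ∈ ks) :
    PySem.List.insertBy (fun a b => decide (key a < key b)) x (ks.flatMap F)
      = ks.flatMap (fun j => if j = key x then F j ++ [x] else F j) := by
  induction ks with
  | nil => simp at hk
  | cons j ks' ih =>
    have hpw := (List.pairwise_cons.mp hks)
    by_cases hx : j = key x
    · have hpass : ∀ y ∈ F j, (fun a b => decide (key a < key b)) x y = false := by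
        intro y hy
        have := hF j (by simp) y hy
        simp [this, hx]
      have hrest : ∀ z ∈ ks'.flatMap F,
          (fun a b => decide (key a < key b)) x z = true := by
        intro z hz
        obtain ⟨j', hj', hzF⟩ := List.mem_flatMap.mp hz
        have h1 := hF j' (by simp [hj']) z hzF
        have h2 : j < j' := hpw.1 j' hj'
        simp [h1, ← hx, h2]
      have hne : ∀ j' ∈ ks', ¬ (j' = key x) := by
        intro j' hj' hEq
        exact absurd (hpw.1 j' hj') (by rw [hEq, ← hx]; exact lt_irrefl _)
      rw [List.flatMap_cons, insertBy_append_left _ _ _ _ hpass,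
        insertBy_eq_cons _ _ _ hrest, List.flatMap_cons, if_pos hx]
      have : ks'.flatMap (fun j => if j = key x then F j ++ [x] else F j)
          = ks'.flatMap F := by
        apply List.flatMap_congr
        intro a ha
        simp [hne a ha]
      rw [this]
      simp
    · have hkx : key x ∈ ks' := by
        rcases List.mem_cons.mp hk with h | h
        · exact absurd h.symm hx
        · exact h
      have hpass : ∀ y ∈ F j, (fun a b => decide (key a < key b)) x y = false := by
        intro y hy
        have h1 := hF j (by simp) y hy
        have h2 : j < key x := hpw.1 _ hkx
        simp [h1]
        omega
      rw [List.flatMap_cons, insertBy_append_left _ _ _ _ hpass,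
        ih hpw.2 (fun j' hj' => hF j' (by simp [hj'])) hkx,
        List.flatMap_cons, if_neg hx]

-- a stable key-sort is the ascending concatenation of the key buckets
theorem sorted_eq_flatMap_buckets (key : String → Int) (xs : List String) (ks : List Int)
    (hks : ks.Pairwise (· < ·)) (hmem : ∀ x ∈ xs, key x ∈ ks) :
    PySem.List.sorted xs key
      = ks.flatMap (fun k => xs.filter (fun x => decide (key x = k))) := by
  induction xs using List.reverseRecOn with
  | nil => simp [PySem.List.sorted, List.flatMap_eq_nil_iff]
  | append_singleton xs x ih =>
    have hx : key x ∈ ks := hmem x (by simp)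
    rw [PySem.List.sorted_eq_foldl_insertBy, List.foldl_append]
    simp only [List.foldl_cons, List.foldl_nil]
    rw [← PySem.List.sorted_eq_foldl_insertBy,
      ih (fun y hy => hmem y (by simp [hy])),
      insertBy_flatMap_buckets key x ks _ hks
        (fun j _ y hy => by
          have := List.of_mem_filter hy
          simpa using this)
        hx]
    apply List.flatMap_congr
    intro k _
    by_cases hkk : k = key x
    · simp [hkk, List.filter_append]
    · simp [hkk, List.filter_append]
      omega

theorem motA_eq_motB (dico : List String) (lettres : String) :
    mot_optimaux dico lettres = mot_optimaux_alt dico lettres := by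
  have hks : ((List.range lettres.toList.length).map
      (fun j : Nat => (j : Int) - lettres.toList.length)).Pairwise (· < ·) := by
    apply List.Pairwise.map _ _ List.pairwise_lt_range
    intro a b hab
    omega
  have hmem : ∀ x ∈ dico.filter (fun w =>
      decide (1 ≤ PySem.Str.len w ∧ PySem.Str.len w ≤ PySem.Str.len lettres)
        && mot_possible w lettres),
      -(PySem.Str.len x) ∈ (List.range lettres.toList.length).map
        (fun j : Nat => (j : Int) - lettres.toList.length) := by
    intro x hx
    have := List.of_mem_filter hx
    simp only [Bool.and_eq_true, decide_eq_true_eq, PySem.Str.len_eq] at this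
    simp only [List.mem_map, List.mem_range, PySem.Str.len_eq]
    refine ⟨lettres.toList.length - x.toList.length, by omega, by omega⟩
  rw [motA_eq_flatMap]
  show _ = PySem.List.sorted _ (fun w => -(PySem.Str.len w))
  rw [sorted_eq_flatMap_buckets _ _ _ hks hmem, List.flatMap_map]
  apply List.flatMap_congr
  intro k hk
  rw [List.mem_range] at hk
  rw [List.filter_filter]
  apply List.filter_congr
  intro w _
  simp only [PySem.Str.len_eq]
  cases hmp : mot_possible w lettres
  · simp
  · simp only [Bool.and_true]
    rw [Bool.eq_iff_iff]
    simp only [Bool.and_eq_true, decide_eq_true_eq]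
    omega

-- ===== VERDICT (by name: the statement is the Claim_ definition above) =====
theorem mot_optimaux_spec : Claim_equal_mot_optimaux := by
  intro dico lettres _
  unfold Spec_mot_optimaux
  exact motA_eq_motB dico lettres
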